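-- pv_equiv track=rewrite | github.com/nobe0716/problem_solving | codeforces/contests/1119/C. Ramesses and Corner Inversion.py | solve
-- ===== SOURCE A (Python) =====
-- def solve(n, m, a, b):
--     row_count_a, col_count_a = [0] * n, [0] * m
--     row_count_b, col_count_b = [0] * n, [0] * m
--     for i in range(n):
--         for j in range(m):
--             if a[i][j] == '1':
--                 row_count_a[i] += 1
--                 col_count_a[j] += 1
--             if b[i][j] == '1':
--                 row_count_b[i] += 1
--                 col_count_b[j] += 1
--
--     return 'Yes' if all(abs(row_count_a[i] - row_count_b[i]) % 2 == 0 for i in range(n)) and all(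
--         abs(col_count_a[i] - col_count_b[i]) % 2 == 0 for i in range(m)) else 'No'
-- ===== SOURCE B (Python) =====
-- def solve(n, m, a, b):
--     # Constructive simulation: build the XOR-difference grid and greedily apply the
--     # allowed corner inversions (flip a 2x2 "corner" rectangle anchored at the last
--     # row/column) to clear every interior cell; the transform is possible iff the
--     # residue is all zero.  A flip preserves every row/column parity, so this returns
--     # 'Yes' exactly when every row and column of the difference grid has even parity,
--     # which is A's criterion.
--     d = [[(a[i][j] == '1') != (b[i][j] == '1') for j in range(m)] for i in range(n)]
--     for i in range(n - 1):
--         for j in range(m - 1):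
--             if d[i][j]:
--                 d[i][j] = not d[i][j]
--                 d[i][m - 1] = not d[i][m - 1]
--                 d[n - 1][j] = not d[n - 1][j]
--                 d[n - 1][m - 1] = not d[n - 1][m - 1]
--     return 'Yes' if all(not x for row in d for x in row) else 'No'
-- ===== Notes on version B (the rewrite author's own statement) =====
-- stated objective: alternative
-- what changed: Replaces A's parity bookkeeping (four row/column count arrays plus a final parity scan) with a constructive greedy simulation: build the XOR-difference grid and actually apply corner inversions anchored at the last row/column to clear every interior cell, answering Yes iff the residual grid is all zero.
import Mathlib
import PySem

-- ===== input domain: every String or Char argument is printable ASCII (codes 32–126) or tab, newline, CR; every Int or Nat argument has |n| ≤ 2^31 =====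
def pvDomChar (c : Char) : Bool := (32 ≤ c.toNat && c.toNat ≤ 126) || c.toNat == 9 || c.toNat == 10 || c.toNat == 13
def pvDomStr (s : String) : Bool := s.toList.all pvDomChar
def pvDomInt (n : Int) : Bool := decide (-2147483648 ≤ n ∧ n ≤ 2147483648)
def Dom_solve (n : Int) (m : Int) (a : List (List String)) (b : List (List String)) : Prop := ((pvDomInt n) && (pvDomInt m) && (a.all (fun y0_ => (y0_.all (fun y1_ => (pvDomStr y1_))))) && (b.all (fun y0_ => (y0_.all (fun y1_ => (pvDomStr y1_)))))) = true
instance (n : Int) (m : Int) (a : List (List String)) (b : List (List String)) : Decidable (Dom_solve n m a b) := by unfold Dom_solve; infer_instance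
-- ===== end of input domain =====

-- B answers the same question constructively: it builds the XOR-difference grid and greedily
-- applies the corner inversions (anchored at the last row/column) to clear every interior cell,
-- answering "Yes" iff the residual grid is all zero — instead of A's four count arrays plus a
-- final parity scan ("alternative"; same asymptotic cost).

-- ===== PORT A =====
-- The four Python count lists are kept as Arrays (a Python list IS an array; O(1) index).
-- Python 'xs[i] += 1': exact here since every index i used is 0 ≤ i < len(xs).
def pyIncr (xs : Array Int) (i : Int) : Array Int :=
  xs.setIfInBounds i.toNat (xs.getD i.toNat 0 + 1)

-- the body of A's inner loop over j (named so lemmas can speak about it; same steps, same order)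
def stepCell (a b : List (List String)) (i : Int)
    (st : Array Int × Array Int × Array Int × Array Int) (j : Int) :
    Array Int × Array Int × Array Int × Array Int :=
  let st1 := if PySem.List.pyGetD (PySem.List.pyGetD a i []) j "" = "1"
    then (pyIncr st.1 i, pyIncr st.2.1 j, st.2.2.1, st.2.2.2) else st
  if PySem.List.pyGetD (PySem.List.pyGetD b i []) j "" = "1"
    then (st1.1, st1.2.1, pyIncr st1.2.2.1 i, pyIncr st1.2.2.2 j) else st1

-- A's inner 'for j in range(m)' loop
def stepRow (m : Int) (a b : List (List String))
    (st : Array Int × Array Int × Array Int × Array Int) (i : Int) :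
    Array Int × Array Int × Array Int × Array Int :=
  (PySem.List.pyRange 0 m 1).foldl (stepCell a b i) st

def solve (n : Int) (m : Int) (a : List (List String)) (b : List (List String)) : String :=
  let st := (PySem.List.pyRange 0 n 1).foldl (stepRow m a b)
    (Array.replicate n.toNat 0, Array.replicate m.toNat 0,
     Array.replicate n.toNat 0, Array.replicate m.toNat 0)
  if ((PySem.List.pyRange 0 n 1).all fun i =>
        (st.1.getD i.toNat 0 - st.2.2.1.getD i.toNat 0).natAbs % 2 == 0)
     && ((PySem.List.pyRange 0 m 1).all fun i =>
        (st.2.1.getD i.toNat 0 - st.2.2.2.getD i.toNat 0).natAbs % 2 == 0)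
  then "Yes" else "No"

-- ===== PORT B =====
-- Python 'd[x][y] = not d[x][y]' (row y and outer x always in range when B executes it)
def dNeg (d : List (List Bool)) (i j : Int) : List (List Bool) :=
  PySem.List.pySetD d i
    (PySem.List.pySetD (PySem.List.pyGetD d i []) j
      (!(PySem.List.pyGetD (PySem.List.pyGetD d i []) j false)))

-- the body of B's inner loop: one conditional corner inversion (four in-place toggles)
def elimStep (n m : Int) (d : List (List Bool)) (i j : Int) : List (List Bool) :=
  if PySem.List.pyGetD (PySem.List.pyGetD d i []) j false then
    dNeg (dNeg (dNeg (dNeg d i j) i (m-1)) (n-1) j) (n-1) (m-1)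
  else d

def solve_alt (n : Int) (m : Int) (a : List (List String)) (b : List (List String)) : String :=
  let d0 := (PySem.List.pyRange 0 n 1).map (fun i =>
    (PySem.List.pyRange 0 m 1).map (fun j =>
      ((PySem.List.pyGetD (PySem.List.pyGetD a i []) j "" == "1")
        != (PySem.List.pyGetD (PySem.List.pyGetD b i []) j "" == "1"))))
  let d := (PySem.List.pyRange 0 (n-1) 1).foldl (fun d i =>
      (PySem.List.pyRange 0 (m-1) 1).foldl (fun d j => elimStep n m d i j) d) d0
  if d.all (fun row => row.all (fun x => !x)) then "Yes" else "No"

-- ===== PRECONDITION & SPEC =====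
-- exactly the inputs on which the Python A returns: the only indexing a[i][j] / b[i][j] happens
-- when 0 < m (and then only for 0 ≤ i < n), so A raises IndexError precisely when 0 < m and some
-- of the first n rows of a or b is missing or shorter than m.
def Pre_solve (n : Int) (m : Int) (a : List (List String)) (b : List (List String)) : Prop :=
  0 < m → n ≤ a.length ∧ n ≤ b.length ∧
    (∀ r ∈ a.take n.toNat, m ≤ r.length) ∧ (∀ r ∈ b.take n.toNat, m ≤ r.length)
instance (n : Int) (m : Int) (a : List (List String)) (b : List (List String)) : Decidable (Pre_solve n m a b) := by unfold Pre_solve; infer_instance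

def pvWitness_solve : Int × Int × List (List String) × List (List String) :=
  (2, 2, [["1","0"],["0","1"]], [["0","1"],["1","0"]])

def Spec_solve (n : Int) (m : Int) (a : List (List String)) (b : List (List String)) (out : String) : Prop := out = solve_alt n m a b
instance (n : Int) (m : Int) (a : List (List String)) (b : List (List String)) (out : String) : Decidable (Spec_solve n m a b out) := by unfold Spec_solve; infer_instance

-- ===== CLAIM (what is proved, stated in full; the proofs are below) =====
def Claim_equal_solve : Prop := ∀ (n : Int) (m : Int) (a : List (List String)) (b : List (List String)), Dom_solve n m a b → Pre_solve n m a b → Spec_solve n m a b (solve n m a b)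

-- ===== LEMMAS AND PROOFS =====

----------------------------------------------------------------
-- shared vocabulary: the XOR-difference grid as a function of nat indices
----------------------------------------------------------------
def hit (g : List (List String)) (i j : Nat) : Bool := (g.getD i []).getD j "" == "1"
def D0 (a b : List (List String)) (x y : Nat) : Bool := hit a x y != hit b x y
def rowN (g : List (List String)) (i M : Nat) : Nat := (List.range M).countP (hit g i)
def colN (g : List (List String)) (k j : Nat) : Nat := (List.range k).countP (fun i => hit g i j)
def rowP (a b : List (List String)) (M x : Nat) : Nat := (List.range M).countP (fun y => D0 a b x y)
def colP (a b : List (List String)) (N y : Nat) : Nat := (List.range N).countP (fun x => D0 a b x y)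

-- the single parity condition both programs decide
def AOK (a b : List (List String)) (N M : Nat) : Bool :=
  ((List.range N).all fun x => rowP a b M x % 2 == 0)
  && ((List.range M).all fun y => colP a b N y % 2 == 0)

theorem countP_parity_add {α : Type} (l : List α) (p q : α → Bool) :
    (l.countP p + l.countP q) % 2 = (l.countP (fun x => p x != q x)) % 2 := by
  induction l with
  | nil => rfl
  | cons x t ih =>
    simp only [List.countP_cons]
    by_cases hp : p x <;> by_cases hq : q x <;> simp [hp, hq] <;> omega

theorem allCongr {α : Type} (l : List α) (p q : α → Bool) (h : ∀ x ∈ l, p x = q x) :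
    l.all p = l.all q := by
  induction l with
  | nil => rfl
  | cons x t ih =>
    simp only [List.all_cons, h x (by simp),
      ih (fun y hy => h y (by simp [hy]))]

----------------------------------------------------------------
-- A-side: the list-level image of A's loop and its characterization
----------------------------------------------------------------
def pyIncrL (xs : List Int) (i : Int) : List Int :=
  PySem.List.pySetD xs i (PySem.List.pyGetD xs i 0 + 1)

def stepCellL (a b : List (List String)) (i : Int)
    (st : List Int × List Int × List Int × List Int) (j : Int) :
    List Int × List Int × List Int × List Int :=
  let st1 := if PySem.List.pyGetD (PySem.List.pyGetD a i []) j "" = "1"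
    then (pyIncrL st.1 i, pyIncrL st.2.1 j, st.2.2.1, st.2.2.2) else st
  if PySem.List.pyGetD (PySem.List.pyGetD b i []) j "" = "1"
    then (st1.1, st1.2.1, pyIncrL st1.2.2.1 i, pyIncrL st1.2.2.2 j) else st1

def stepRowL (m : Int) (a b : List (List String))
    (st : List Int × List Int × List Int × List Int) (i : Int) :
    List Int × List Int × List Int × List Int :=
  (PySem.List.pyRange 0 m 1).foldl (stepCellL a b i) st

def quadL (st : Array Int × Array Int × Array Int × Array Int) :
    List Int × List Int × List Int × List Int :=
  (st.1.toList, st.2.1.toList, st.2.2.1.toList, st.2.2.2.toList)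

theorem getD_array_toList (xs : Array Int) (k : Nat) (d : Int) :
    xs.getD k d = xs.toList.getD k d := by
  rw [Array.getD_eq_getD_getElem?, List.getD_eq_getElem?_getD, Array.getElem?_toList]

theorem toList_pyIncr (xs : Array Int) (i : Int) (hi : 0 ≤ i) :
    (pyIncr xs i).toList = pyIncrL xs.toList i := by
  unfold pyIncr pyIncrL
  rw [PySem.List.pySetD_of_nonneg _ _ hi, PySem.List.pyGetD_of_nonneg _ _ hi,
      Array.toList_setIfInBounds, getD_array_toList]

theorem quadL_stepCell (a b : List (List String)) (i j : Int) (hi : 0 ≤ i) (hj : 0 ≤ j)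
    (st : Array Int × Array Int × Array Int × Array Int) :
    quadL (stepCell a b i st j) = stepCellL a b i (quadL st) j := by
  unfold stepCell stepCellL
  by_cases ha : PySem.List.pyGetD (PySem.List.pyGetD a i []) j "" = "1" <;>
    by_cases hb : PySem.List.pyGetD (PySem.List.pyGetD b i []) j "" = "1" <;>
      simp [ha, hb, quadL, toList_pyIncr _ _ hi, toList_pyIncr _ _ hj]

theorem quadL_stepRow (m : Int) (a b : List (List String)) (i : Int) (hi : 0 ≤ i)
    (st : Array Int × Array Int × Array Int × Array Int) :
    quadL (stepRow m a b st i) = stepRowL m a b (quadL st) i := by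
  unfold stepRow stepRowL
  have key : ∀ (l : List Int), (∀ x ∈ l, 0 ≤ x) →
      ∀ st, quadL (l.foldl (stepCell a b i) st) = l.foldl (stepCellL a b i) (quadL st) := by
    intro l
    induction l with
    | nil => intro _ st; rfl
    | cons x t ih =>
      intro hmem st
      simp only [List.foldl_cons]
      rw [ih (fun y hy => hmem y (by simp [hy])) _,
          quadL_stepCell a b i x hi (hmem x (by simp))]
  exact key _ (fun x hx => (PySem.List.mem_pyRange_one.mp hx).1) st

theorem quadL_fold (n m : Int) (a b : List (List String)) :
    quadL ((PySem.List.pyRange 0 n 1).foldl (stepRow m a b)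
      (Array.replicate n.toNat 0, Array.replicate m.toNat 0,
       Array.replicate n.toNat 0, Array.replicate m.toNat 0))
    = (PySem.List.pyRange 0 n 1).foldl (stepRowL m a b)
      (List.replicate n.toNat 0, List.replicate m.toNat 0,
       List.replicate n.toNat 0, List.replicate m.toNat 0) := by
  have key : ∀ (l : List Int), (∀ x ∈ l, 0 ≤ x) →
      ∀ st, quadL (l.foldl (stepRow m a b) st) = l.foldl (stepRowL m a b) (quadL st) := by
    intro l
    induction l with
    | nil => intro _ st; rfl
    | cons x t ih =>
      intro hmem st
      simp only [List.foldl_cons]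
      rw [ih (fun y hy => hmem y (by simp [hy])) _,
          quadL_stepRow m a b x (hmem x (by simp))]
  rw [key _ (fun x hx => (PySem.List.mem_pyRange_one.mp hx).1) _]
  simp [quadL, Array.toList_replicate]

-- Nat-level views of the loop state
def incN (xs : List Int) (i : Nat) : List Int := xs.set i (xs.getD i 0 + 1)
def addAtN (xs : List Int) (i : Nat) (c : Int) : List Int := xs.set i (xs.getD i 0 + c)

theorem pyIncr_natCast (xs : List Int) (i : Nat) : pyIncrL xs (i : Int) = incN xs i := by
  simp [pyIncrL, incN, PySem.List.pySetD_natCast, PySem.List.pyGetD_natCast]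

theorem getD_set_getD (xs : List Int) (i : Nat) (v : Int) (hi : i < xs.length) :
    (xs.set i v).getD i 0 = v := by
  rw [List.getD_eq_getElem _ _ (by simpa using hi)]
  simp

theorem addAtN_zero (xs : List Int) (i : Nat) : addAtN xs i 0 = xs := by
  apply List.ext_getElem (by simp [addAtN])
  intro j h1 h2
  simp only [addAtN, add_zero, List.getElem_set]
  split
  · next hij => subst hij; rw [List.getD_eq_getElem _ _ (by simp [addAtN] at h1; omega)]
  · rfl

theorem incN_addAtN (xs : List Int) (i : Nat) (c : Int) :
    incN (addAtN xs i c) i = addAtN xs i (c + 1) := by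
  by_cases hi : i < xs.length
  · unfold incN addAtN
    rw [getD_set_getD xs i _ hi, List.set_set]
    ring_nf
  · have h1 : xs.set i (xs.getD i 0 + c) = xs := List.set_eq_of_length_le (by omega)
    unfold incN addAtN
    rw [h1, List.set_eq_of_length_le (by omega), List.set_eq_of_length_le (by omega)]

theorem set_map_range {β : Type} (F : Nat → β) (M k : Nat) (v : β) (_hk : k < M) :
    ((List.range M).map F).set k v
      = (List.range M).map (fun t => if t = k then v else F t) := by
  apply List.ext_getElem (by simp)
  intro j h1 h2
  simp only [List.getElem_set, List.getElem_map, List.getElem_range]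
  by_cases hjk : k = j
  · simp [hjk]
  · have hjk' : ¬ (j = k) := fun h => hjk h.symm
    simp [hjk, hjk']

theorem incN_map_range (F : Nat → Int) (M k : Nat) (hk : k < M) :
    incN ((List.range M).map F) k
      = (List.range M).map (fun t => if t = k then F k + 1 else F t) := by
  unfold incN
  rw [List.getD_eq_getElem _ _ (by simpa using hk), set_map_range _ _ _ _ hk]
  simp

theorem addAtN_map_range (F : Nat → Int) (M k : Nat) (c : Int) (hk : k < M) :
    addAtN ((List.range M).map F) k c
      = (List.range M).map (fun t => if t = k then F k + c else F t) := by
  unfold addAtN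
  rw [List.getD_eq_getElem _ _ (by simpa using hk), set_map_range _ _ _ _ hk]
  simp

theorem rowN_succ (g : List (List String)) (i k : Nat) :
    rowN g i (k+1) = rowN g i k + (if hit g i k then 1 else 0) := by
  simp [rowN, List.range_succ, List.countP_append, List.countP_cons]

theorem colN_succ (g : List (List String)) (k j : Nat) :
    colN g (k+1) j = colN g k j + (if hit g k j then 1 else 0) := by
  simp [colN, List.range_succ, List.countP_append, List.countP_cons]

theorem stepRow_char (m : Int) (a b : List (List String)) (i : Nat)
    (ra rb : List Int) (f g : Nat → Int) :
    stepRowL m a b (ra, (List.range m.toNat).map f, rb, (List.range m.toNat).map g) (i : Int)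
      = (addAtN ra i (rowN a i m.toNat),
         (List.range m.toNat).map (fun j => f j + if hit a i j then 1 else 0),
         addAtN rb i (rowN b i m.toNat),
         (List.range m.toNat).map (fun j => g j + if hit b i j then 1 else 0)) := by
  unfold stepRowL
  rw [PySem.List.pyRange_zero, List.foldl_map]
  have key : ∀ k, k ≤ m.toNat →
      (List.range k).foldl (fun x (y : Nat) => stepCellL a b (i : Int) x (y : Int))
        (ra, (List.range m.toNat).map f, rb, (List.range m.toNat).map g)
      = (addAtN ra i (rowN a i k),
         (List.range m.toNat).map (fun j => if j < k then f j + (if hit a i j then 1 else 0) else f j),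
         addAtN rb i (rowN b i k),
         (List.range m.toNat).map (fun j => if j < k then g j + (if hit b i j then 1 else 0) else g j)) := by
    intro k
    induction k with
    | zero => intro _; simp [rowN, addAtN_zero]
    | succ k ih =>
      intro hk1
      have hkM : k < m.toNat := by omega
      rw [List.range_succ, List.foldl_append, ih (by omega)]
      simp only [List.foldl_cons, List.foldl_nil]
      have hcast : ∀ (r : List String), PySem.List.pyGetD r (k : Int) "" = r.getD k ""
        := fun r => PySem.List.pyGetD_natCast r k ""
      have hgA : PySem.List.pyGetD (PySem.List.pyGetD a (i : Int) []) (k : Int) ""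
          = (a.getD i []).getD k "" := by
        rw [hcast, PySem.List.pyGetD_natCast]
      have hgB : PySem.List.pyGetD (PySem.List.pyGetD b (i : Int) []) (k : Int) ""
          = (b.getD i []).getD k "" := by
        rw [hcast, PySem.List.pyGetD_natCast]
      have mapA : ∀ (F : Nat → Int) (c : Bool),
          (List.range m.toNat).map (fun t => if t = k
              then (if k < k then F k + (if c then 1 else 0) else F k) + 1
              else if t < k then F t + (if c then 1 else 0) else F t)
          = (List.range m.toNat).map (fun t => if t = k then F k + 1
              else if t < k then F t + (if c then 1 else 0) else F t) := by
        intro F c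
        apply List.map_congr_left
        intro t _
        by_cases htk : t = k <;> simp [htk]
      by_cases ha : (a.getD i []).getD k "" = "1" <;>
        by_cases hb : (b.getD i []).getD k "" = "1" <;>
          simp only [stepCellL, hgA, hgB, ha, hb, if_true, if_false, ite_true, ite_false,
            pyIncr_natCast, incN_addAtN, incN_map_range _ _ _ hkM,
            rowN_succ, hit, beq_iff_eq] <;>
        · refine Prod.ext ?_ (Prod.ext ?_ (Prod.ext ?_ ?_)) <;>
          simp only [hit, beq_iff_eq, ha, hb, if_true, if_false, ite_true, ite_false] <;>
          first
          | (apply List.map_congr_left; intro t ht; simp only [List.mem_range] at ht;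
             by_cases htk : t = k <;>
               [skip; skip] <;>
               (try subst htk) <;>
               split_ifs <;> first | rfl | omega | ring | simp_all)
          | (push_cast; ring_nf)
          | push_cast
          | rfl
  have := key m.toNat (le_refl _)
  rw [this]
  have hM : ∀ (F : Nat → Int) (G : Nat → Bool),
      (List.range m.toNat).map (fun j => if j < m.toNat then F j + (if G j then 1 else 0) else F j)
      = (List.range m.toNat).map (fun j => F j + if G j then 1 else 0) := by
    intro F G
    apply List.map_congr_left
    intro t ht
    simp only [List.mem_range] at ht
    simp [ht]
  rw [hM f (hit a i), hM g (hit b i)]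

theorem fold_char (n m : Int) (a b : List (List String)) :
    (PySem.List.pyRange 0 n 1).foldl (stepRowL m a b)
      (List.replicate n.toNat 0, List.replicate m.toNat 0,
       List.replicate n.toNat 0, List.replicate m.toNat 0)
    = ((List.range n.toNat).map (fun i => (rowN a i m.toNat : Int)),
       (List.range m.toNat).map (fun j => (colN a n.toNat j : Int)),
       (List.range n.toNat).map (fun i => (rowN b i m.toNat : Int)),
       (List.range m.toNat).map (fun j => (colN b n.toNat j : Int))) := by
  rw [PySem.List.pyRange_zero, List.foldl_map]
  have key : ∀ k, k ≤ n.toNat →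
      (List.range k).foldl (fun st (y : Nat) => stepRowL m a b st (y : Int))
        (List.replicate n.toNat 0, List.replicate m.toNat 0,
         List.replicate n.toNat 0, List.replicate m.toNat 0)
      = ((List.range n.toNat).map (fun i => if i < k then (rowN a i m.toNat : Int) else 0),
         (List.range m.toNat).map (fun j => (colN a k j : Int)),
         (List.range n.toNat).map (fun i => if i < k then (rowN b i m.toNat : Int) else 0),
         (List.range m.toNat).map (fun j => (colN b k j : Int))) := by
    intro k
    induction k with
    | zero =>
      intro _
      simp [colN, List.map_const']
    | succ k ih =>
      intro hk1
      have hkN : k < n.toNat := by omega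
      rw [List.range_succ, List.foldl_append, ih (by omega)]
      simp only [List.foldl_cons, List.foldl_nil]
      rw [stepRow_char m a b k]
      refine Prod.ext ?_ (Prod.ext ?_ (Prod.ext ?_ ?_)) <;>
        simp only <;>
        first
        | (rw [addAtN_map_range _ _ _ _ hkN]
           apply List.map_congr_left
           intro t ht; simp only [List.mem_range] at ht
           by_cases htk : t = k
           · subst htk; simp
           · split_ifs <;> first | rfl | omega | simp_all)
        | (apply List.map_congr_left
           intro j _
           rw [colN_succ]
           push_cast
           ring)
  rw [key n.toNat le_rfl]
  refine Prod.ext ?_ (Prod.ext ?_ (Prod.ext ?_ ?_)) <;>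
    simp only <;>
    first
    | rfl
    | (apply List.map_congr_left
       intro t ht; simp only [List.mem_range] at ht
       simp [ht])

-- the natAbs parity tests over the two count tables, in terms of plain Nat parities
theorem allNatAbs (n : Int) (N : Nat) (hN : N = n.toNat) (f g : Nat → Nat) :
    ((PySem.List.pyRange 0 n 1).all fun i =>
      ((PySem.List.pyGetD ((List.range N).map (fun t => (f t : Int))) i 0)
        - (PySem.List.pyGetD ((List.range N).map (fun t => (g t : Int))) i 0)).natAbs % 2 == 0)
    = ((List.range N).all fun t => (f t + g t) % 2 == 0) := by
  subst hN
  rw [PySem.List.pyRange_zero, List.all_map]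
  apply allCongr
  intro t ht
  simp only [List.mem_range] at ht
  simp only [Function.comp_apply]
  rw [PySem.List.pyGetD_natCast, PySem.List.pyGetD_natCast,
      PySem.List.getD_map_range _ _ _ _ ht, PySem.List.getD_map_range _ _ _ _ ht]
  have h2 : (((f t : Int)) - (g t : Int)).natAbs % 2 = (f t + g t) % 2 := by omega
  rw [h2]

theorem A_char (n m : Int) (a b : List (List String)) :
    solve n m a b = if AOK a b n.toNat m.toNat then "Yes" else "No" := by
  simp only [solve]
  set stA := (PySem.List.pyRange 0 n 1).foldl (stepRow m a b)
    (Array.replicate n.toNat 0, Array.replicate m.toNat 0,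
     Array.replicate n.toNat 0, Array.replicate m.toNat 0) with hstA
  have hq : quadL stA
      = ((List.range n.toNat).map (fun i => (rowN a i m.toNat : Int)),
         (List.range m.toNat).map (fun j => (colN a n.toNat j : Int)),
         (List.range n.toNat).map (fun i => (rowN b i m.toNat : Int)),
         (List.range m.toNat).map (fun j => (colN b n.toNat j : Int))) := by
    rw [hstA, quadL_fold, fold_char]
  have h1 : stA.1.toList = (List.range n.toNat).map (fun i => (rowN a i m.toNat : Int)) := by
    have := congrArg (fun t => t.1) hq; simpa [quadL] using this
  have h2 : stA.2.1.toList = (List.range m.toNat).map (fun j => (colN a n.toNat j : Int)) := by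
    have := congrArg (fun t => t.2.1) hq; simpa [quadL] using this
  have h3 : stA.2.2.1.toList = (List.range n.toNat).map (fun i => (rowN b i m.toNat : Int)) := by
    have := congrArg (fun t => t.2.2.1) hq; simpa [quadL] using this
  have h4 : stA.2.2.2.toList = (List.range m.toNat).map (fun j => (colN b n.toNat j : Int)) := by
    have := congrArg (fun t => t.2.2.2) hq; simpa [quadL] using this
  have hAll1 : ((PySem.List.pyRange 0 n 1).all fun i =>
        (stA.1.getD i.toNat 0 - stA.2.2.1.getD i.toNat 0).natAbs % 2 == 0)
      = ((List.range n.toNat).all fun x => rowP a b m.toNat x % 2 == 0) := by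
    have hmid : ((PySem.List.pyRange 0 n 1).all fun i =>
        (stA.1.getD i.toNat 0 - stA.2.2.1.getD i.toNat 0).natAbs % 2 == 0)
        = ((PySem.List.pyRange 0 n 1).all fun i =>
          ((PySem.List.pyGetD ((List.range n.toNat).map (fun t => ((rowN a t m.toNat : Nat) : Int))) i 0)
            - (PySem.List.pyGetD ((List.range n.toNat).map (fun t => ((rowN b t m.toNat : Nat) : Int))) i 0)).natAbs % 2 == 0) := by
      apply allCongr
      intro x hx
      have h0 : 0 ≤ x := (PySem.List.mem_pyRange_one.mp hx).1
      rw [getD_array_toList, getD_array_toList, h1, h3,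
          ← PySem.List.pyGetD_of_nonneg _ _ h0, ← PySem.List.pyGetD_of_nonneg _ _ h0]
    rw [hmid, allNatAbs n n.toNat rfl]
    apply allCongr
    intro t _
    have : (rowN a t m.toNat + rowN b t m.toNat) % 2 = rowP a b m.toNat t % 2 := by
      unfold rowN rowP
      exact countP_parity_add _ _ _
    rw [this]
  have hAll2 : ((PySem.List.pyRange 0 m 1).all fun i =>
        (stA.2.1.getD i.toNat 0 - stA.2.2.2.getD i.toNat 0).natAbs % 2 == 0)
      = ((List.range m.toNat).all fun y => colP a b n.toNat y % 2 == 0) := by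
    have hmid : ((PySem.List.pyRange 0 m 1).all fun i =>
        (stA.2.1.getD i.toNat 0 - stA.2.2.2.getD i.toNat 0).natAbs % 2 == 0)
        = ((PySem.List.pyRange 0 m 1).all fun i =>
          ((PySem.List.pyGetD ((List.range m.toNat).map (fun t => ((colN a n.toNat t : Nat) : Int))) i 0)
            - (PySem.List.pyGetD ((List.range m.toNat).map (fun t => ((colN b n.toNat t : Nat) : Int))) i 0)).natAbs % 2 == 0) := by
      apply allCongr
      intro x hx
      have h0 : 0 ≤ x := (PySem.List.mem_pyRange_one.mp hx).1
      rw [getD_array_toList, getD_array_toList, h2, h4,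
          ← PySem.List.pyGetD_of_nonneg _ _ h0, ← PySem.List.pyGetD_of_nonneg _ _ h0]
    rw [hmid, allNatAbs m m.toNat rfl]
    apply allCongr
    intro t _
    have : (colN a n.toNat t + colN b n.toNat t) % 2 = colP a b n.toNat t % 2 := by
      unfold colN colP
      exact countP_parity_add _ _ _
    rw [this]
  rw [hAll1, hAll2]
  rfl

----------------------------------------------------------------
-- B-side: nat-level view of the elimination over grids of Bools
----------------------------------------------------------------
def getB (d : List (List Bool)) (x y : Nat) : Bool := (d.getD x []).getD y false
def ShapeB (d : List (List Bool)) (N M : Nat) : Prop :=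
  d.length = N ∧ ∀ x, x < N → (d.getD x []).length = M
def negN (d : List (List Bool)) (x y : Nat) : List (List Bool) :=
  d.set x ((d.getD x []).set y (!((d.getD x []).getD y false)))
def stepN (N M : Nat) (d : List (List Bool)) (x y : Nat) : List (List Bool) :=
  if getB d x y then negN (negN (negN (negN d x y) x (M-1)) (N-1) y) (N-1) (M-1) else d
def rPar (d : List (List Bool)) (M x : Nat) : Nat := (List.range M).countP (fun y => getB d x y)
def cPar (d : List (List Bool)) (N y : Nat) : Nat := (List.range N).countP (fun x => getB d x y)

theorem dNeg_natCast (d : List (List Bool)) (x y : Nat) :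
    dNeg d (x : Int) (y : Int) = negN d x y := by
  simp [dNeg, negN, PySem.List.pySetD_natCast, PySem.List.pyGetD_natCast]

theorem elimStep_cast (n m : Int) (hn : 0 < n) (hm : 0 < m)
    (d : List (List Bool)) (x y : Nat) :
    elimStep n m d (x : Int) (y : Int) = stepN n.toNat m.toNat d x y := by
  have h1 : (n - 1 : Int) = ((n.toNat - 1 : Nat) : Int) := by omega
  have h2 : (m - 1 : Int) = ((m.toNat - 1 : Nat) : Int) := by omega
  rw [elimStep, stepN, h1, h2]
  simp only [dNeg_natCast, PySem.List.pyGetD_natCast, getB]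
  rfl

theorem getD_set' {α : Type} (l : List α) (i : Nat) (v : α) (j : Nat) (dflt : α)
    (hi : i < l.length) :
    (l.set i v).getD j dflt = if j = i then v else l.getD j dflt := by
  rw [List.getD_eq_getElem?_getD, List.getD_eq_getElem?_getD, List.getElem?_set]
  by_cases h : j = i
  · simp [h, hi]
  · have h' : ¬ (i = j) := fun e => h e.symm
    simp [h, h']

theorem shape_negN (d : List (List Bool)) (N M : Nat) (x y : Nat)
    (hs : ShapeB d N M) (hx : x < N) :
    ShapeB (negN d x y) N M := by
  obtain ⟨hl, hr⟩ := hs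
  refine ⟨by simp [negN, hl], ?_⟩
  intro x' hx'
  rw [negN, getD_set' _ _ _ _ _ (by omega)]
  by_cases h : x' = x
  · rw [if_pos h, List.length_set]
    exact h ▸ hr x' hx'
  · rw [if_neg h]
    exact hr x' hx' 

theorem getB_negN (d : List (List Bool)) (N M : Nat) (x y : Nat)
    (hs : ShapeB d N M) (hx : x < N) (hy : y < M) (x' y' : Nat) :
    getB (negN d x y) x' y' = if x' = x ∧ y' = y then !(getB d x y) else getB d x' y' := by
  obtain ⟨hl, hr⟩ := hs
  unfold getB negN
  rw [getD_set' _ _ _ _ _ (by omega)]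
  by_cases h : x' = x
  · rw [if_pos h]
    rw [getD_set' _ _ _ _ _ (by rw [hr x hx]; omega)]
    by_cases h2 : y' = y <;> simp [h, h2]
  · rw [if_neg h]
    have hne : ¬ (x' = x ∧ y' = y) := fun hc => h hc.1
    rw [if_neg hne]

-- the quadruple toggle: membership mask over the four corner cells
theorem getB_negN_xor (d : List (List Bool)) (N M : Nat) (x y : Nat)
    (hs : ShapeB d N M) (hx : x < N) (hy : y < M) (x' y' : Nat) :
    getB (negN d x y) x' y' = xor (getB d x' y') (decide (x' = x ∧ y' = y)) := by
  rw [getB_negN d N M x y hs hx hy x' y']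
  by_cases h : x' = x ∧ y' = y
  · rw [if_pos h]
    obtain ⟨h1, h2⟩ := h
    rw [h1, h2]
    simp
  · rw [if_neg h]
    simp [h]

theorem getB_quad (d : List (List Bool)) (N M : Nat) (x y : Nat)
    (hs : ShapeB d N M) (hx : x < N - 1) (hy : y < M - 1) (x' y' : Nat) :
    getB (negN (negN (negN (negN d x y) x (M-1)) (N-1) y) (N-1) (M-1)) x' y'
      = if (x' = x ∨ x' = N-1) ∧ (y' = y ∨ y' = M-1)
        then !(getB d x' y') else getB d x' y' := by
  have hxN : x < N := by omega
  have hyM : y < M := by omega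
  have hN1 : N - 1 < N := by omega
  have hM1 : M - 1 < M := by omega
  have hxne : x ≠ N - 1 := by omega
  have hyne : y ≠ M - 1 := by omega
  have s1 := shape_negN d N M x y hs hxN
  have s2 := shape_negN _ N M x (M-1) s1 hxN
  have s3 := shape_negN _ N M (N-1) y s2 hN1
  rw [getB_negN_xor _ N M (N-1) (M-1) s3 hN1 hM1,
      getB_negN_xor _ N M (N-1) y s2 hN1 hyM,
      getB_negN_xor _ N M x (M-1) s1 hxN hM1,
      getB_negN_xor d N M x y hs hxN hyM]
  by_cases e1 : x' = x <;> by_cases e2 : x' = N-1 <;>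
    by_cases e3 : y' = y <;> by_cases e4 : y' = M-1 <;>
    simp [e1, e2, e3, e4, hxne, hyne, Ne.symm hxne, Ne.symm hyne]

theorem shape_quad (d : List (List Bool)) (N M : Nat) (x y : Nat)
    (hs : ShapeB d N M) (hx : x < N - 1) (hy : y < M - 1) :
    ShapeB (negN (negN (negN (negN d x y) x (M-1)) (N-1) y) (N-1) (M-1)) N M := by
  have hxN : x < N := by omega
  have hN1 : N - 1 < N := by omega
  exact shape_negN _ N M (N-1) (M-1)
    (shape_negN _ N M (N-1) y (shape_negN _ N M x (M-1) (shape_negN d N M x y hs hxN) hxN) hN1) hN1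

theorem countP_two (L j k : Nat) (hjk : j ≠ k) :
    (List.range L).countP (fun t => decide (t = j ∨ t = k))
      = (if j < L then 1 else 0) + (if k < L then 1 else 0) := by
  induction L with
  | zero => simp
  | succ L ih =>
    rw [List.range_succ, List.countP_append, ih]
    simp only [List.countP_cons, List.countP_nil, decide_eq_true_eq]
    split_ifs <;> omega

theorem countP_toggle_parity (L : Nat) (f : Nat → Bool) (c : Nat → Prop) [DecidablePred c]
    (hc : (List.range L).countP (fun t => decide (c t)) = 2) :
    ((List.range L).countP (fun t => if c t then !f t else f t)) % 2
      = ((List.range L).countP f) % 2 := by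
  have hadd := countP_parity_add (List.range L) f (fun t => if c t then !f t else f t)
  have heq : (List.range L).countP (fun t => f t != (if c t then !f t else f t)) = 2 := by
    rw [← hc]
    apply List.countP_congr
    intro t _
    by_cases h : c t <;> by_cases hf : f t <;> simp [h, hf]
  rw [heq] at hadd
  omega

theorem stepN_props (N M : Nat) (d : List (List Bool)) (x y : Nat)
    (hs : ShapeB d N M) (hx : x < N - 1) (hy : y < M - 1) :
    ShapeB (stepN N M d x y) N M ∧
    (∀ x', rPar (stepN N M d x y) M x' % 2 = rPar d M x' % 2) ∧
    (∀ y', cPar (stepN N M d x y) N y' % 2 = cPar d N y' % 2) ∧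
    (∀ x' y', x' < N - 1 → y' < M - 1 → ¬(x' = x ∧ y' = y) →
      getB (stepN N M d x y) x' y' = getB d x' y') ∧
    getB (stepN N M d x y) x y = false := by
  by_cases hcond : getB d x y
  · have hst : stepN N M d x y
        = negN (negN (negN (negN d x y) x (M-1)) (N-1) y) (N-1) (M-1) := by
      simp [stepN, hcond]
    have hget := getB_quad d N M x y hs hx hy
    refine ⟨hst ▸ shape_quad d N M x y hs hx hy, ?_, ?_, ?_, ?_⟩
    · -- row parities preserved
      intro x'
      by_cases hmem : x' = x ∨ x' = N-1
      · have hrow : ∀ y', getB (stepN N M d x y) x' y'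
            = if (y' = y ∨ y' = M-1) then !(getB d x' y') else getB d x' y' := by
          intro y'
          rw [hst, hget x' y']
          by_cases h4 : y' = y ∨ y' = M-1
          · rw [if_pos ⟨hmem, h4⟩, if_pos h4]
          · rw [if_neg (fun hc => h4 hc.2), if_neg h4]
        have hc : (List.range M).countP (fun t => decide (t = y ∨ t = M-1)) = 2 := by
          rw [countP_two M y (M-1) (by omega)]
          have hyM : y < M := by omega
          have hM1 : M - 1 < M := by omega
          rw [if_pos hyM, if_pos hM1]
        unfold rPar
        rw [List.countP_congr (fun t _ => by rw [hrow t])]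
        exact countP_toggle_parity M (fun t => getB d x' t) (fun t => t = y ∨ t = M-1) hc
      · have hrow : ∀ y', getB (stepN N M d x y) x' y' = getB d x' y' := by
          intro y'
          rw [hst, hget x' y', if_neg (fun hc => hmem hc.1)]
        unfold rPar
        rw [List.countP_congr (fun t _ => by rw [hrow t])]
    · -- column parities preserved
      intro y'
      by_cases hmem : y' = y ∨ y' = M-1
      · have hcol : ∀ x', getB (stepN N M d x y) x' y'
            = if (x' = x ∨ x' = N-1) then !(getB d x' y') else getB d x' y' := by
          intro x'
          rw [hst, hget x' y']
          by_cases h4 : x' = x ∨ x' = N-1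
          · rw [if_pos ⟨h4, hmem⟩, if_pos h4]
          · rw [if_neg (fun hc => h4 hc.1), if_neg h4]
        have hc : (List.range N).countP (fun t => decide (t = x ∨ t = N-1)) = 2 := by
          rw [countP_two N x (N-1) (by omega)]
          have hxN : x < N := by omega
          have hN1 : N - 1 < N := by omega
          rw [if_pos hxN, if_pos hN1]
        unfold cPar
        rw [List.countP_congr (fun t _ => by rw [hcol t])]
        exact countP_toggle_parity N (fun t => getB d t y') (fun t => t = x ∨ t = N-1) hc
      · have hcol : ∀ x', getB (stepN N M d x y) x' y' = getB d x' y' := by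
          intro x'
          rw [hst, hget x' y', if_neg (fun hc => hmem hc.2)]
        unfold cPar
        rw [List.countP_congr (fun t _ => by rw [hcol t])]
    · intro x' y' hx' hy' hne
      rw [hst, hget x' y']
      have hmask : ¬ ((x' = x ∨ x' = N-1) ∧ (y' = y ∨ y' = M-1)) := by omega
      rw [if_neg hmask]
    · rw [hst, hget x y, if_pos ⟨Or.inl rfl, Or.inl rfl⟩]
      simp [hcond]
  · have hst : stepN N M d x y = d := by simp [stepN, hcond]
    rw [hst]
    exact ⟨hs, fun _ => rfl, fun _ => rfl, fun _ _ _ _ _ => rfl,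
      by simpa using hcond⟩

theorem innerFold (N M : Nat) (x : Nat) (hx : x < N - 1)
    (d : List (List Bool)) (hs : ShapeB d N M) (k : Nat) (hk : k ≤ M - 1) :
    ShapeB ((List.range k).foldl (fun d y => stepN N M d x y) d) N M ∧
    (∀ x', rPar ((List.range k).foldl (fun d y => stepN N M d x y) d) M x' % 2 = rPar d M x' % 2) ∧
    (∀ y', cPar ((List.range k).foldl (fun d y => stepN N M d x y) d) N y' % 2 = cPar d N y' % 2) ∧
    (∀ x' y', x' < N - 1 → y' < M - 1 → x' ≠ x →
      getB ((List.range k).foldl (fun d y => stepN N M d x y) d) x' y' = getB d x' y') ∧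
    (∀ y', y' < k → getB ((List.range k).foldl (fun d y => stepN N M d x y) d) x y' = false) := by
  induction k with
  | zero => exact ⟨hs, fun _ => rfl, fun _ => rfl, fun _ _ _ _ _ => rfl, by omega⟩
  | succ k ih =>
    have hk' : k ≤ M - 1 := by omega
    have hkM : k < M - 1 := by omega
    obtain ⟨ihS, ihR, ihC, ihU, ihZ⟩ := ih hk'
    set dk := (List.range k).foldl (fun d y => stepN N M d x y) d with hdk
    have hfold : (List.range (k+1)).foldl (fun d y => stepN N M d x y) d = stepN N M dk x k := by
      rw [List.range_succ, List.foldl_append]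
      rfl
    obtain ⟨sS, sR, sC, sU, sZ⟩ := stepN_props N M dk x k ihS hx hkM
    rw [hfold]
    refine ⟨sS, ?_, ?_, ?_, ?_⟩
    · intro x'; rw [sR x', ihR x']
    · intro y'; rw [sC y', ihC y']
    · intro x' y' hx' hy' hne
      rw [sU x' y' hx' hy' (by omega), ihU x' y' hx' hy' hne]
    · intro y' hy'
      by_cases h : y' = k
      · subst h; exact sZ
      · rw [sU x y' hx (by omega) (by simp [h])]
        exact ihZ y' (by omega)

theorem outerFold (N M : Nat) (d0 : List (List Bool)) (hs : ShapeB d0 N M)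
    (i : Nat) (hi : i ≤ N - 1) :
    ShapeB ((List.range i).foldl (fun d x => (List.range (M-1)).foldl (fun d y => stepN N M d x y) d) d0) N M ∧
    (∀ x', rPar ((List.range i).foldl (fun d x => (List.range (M-1)).foldl (fun d y => stepN N M d x y) d) d0) M x' % 2 = rPar d0 M x' % 2) ∧
    (∀ y', cPar ((List.range i).foldl (fun d x => (List.range (M-1)).foldl (fun d y => stepN N M d x y) d) d0) N y' % 2 = cPar d0 N y' % 2) ∧
    (∀ x' y', x' < i → y' < M - 1 →
      getB ((List.range i).foldl (fun d x => (List.range (M-1)).foldl (fun d y => stepN N M d x y) d) d0) x' y' = false) := by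
  induction i with
  | zero => exact ⟨hs, fun _ => rfl, fun _ => rfl, by omega⟩
  | succ i ih =>
    have hi' : i ≤ N - 1 := by omega
    have hiN : i < N - 1 := by omega
    obtain ⟨ihS, ihR, ihC, ihZ⟩ := ih hi'
    set di := (List.range i).foldl (fun d x => (List.range (M-1)).foldl (fun d y => stepN N M d x y) d) d0 with hdi
    have hfold : (List.range (i+1)).foldl (fun d x => (List.range (M-1)).foldl (fun d y => stepN N M d x y) d) d0
        = (List.range (M-1)).foldl (fun d y => stepN N M d i y) di := by
      rw [List.range_succ, List.foldl_append]
      rfl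
    obtain ⟨sS, sR, sC, sU, sZ⟩ := innerFold N M i hiN di ihS (M-1) le_rfl
    rw [hfold]
    refine ⟨sS, ?_, ?_, ?_⟩
    · intro x'; rw [sR x', ihR x']
    · intro y'; rw [sC y', ihC y']
    · intro x' y' hx' hy'
      by_cases h : x' = i
      · subst h; exact sZ y' hy'
      · rw [sU x' y' (by omega) hy' h]
        exact ihZ x' y' (by omega) hy'

theorem countP_last (L : Nat) (hL : 1 ≤ L) (f : Nat → Bool) (h0 : ∀ t, t < L - 1 → f t = false) :
    (List.range L).countP f = if f (L-1) then 1 else 0 := by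
  obtain ⟨L', rfl⟩ : ∃ L'', L = L'' + 1 := ⟨L - 1, by omega⟩
  rw [List.range_succ, List.countP_append]
  have h1 : (List.range L').countP f = 0 := by
    rw [List.countP_eq_zero]
    intro t ht
    have := List.mem_range.mp ht
    simp [h0 t (by omega)]
  simp [h1, List.countP_cons]

theorem all_false_iff (d : List (List Bool)) (N M : Nat) (hs : ShapeB d N M) :
    ((d.all fun row => row.all fun v => !v) = true)
      ↔ ∀ x y, x < N → y < M → getB d x y = false := by
  obtain ⟨hl, hr⟩ := hs
  simp only [List.all_eq_true]
  constructor
  · intro h x y hx hy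
    have hxd : x < d.length := by omega
    have hrow : d.getD x [] = d[x] := List.getD_eq_getElem _ _ hxd
    have hylen : y < (d.getD x []).length := by rw [hr x hx]; omega
    have hv : (d.getD x []).getD y false = (d.getD x [])[y] := List.getD_eq_getElem _ _ hylen
    have hrmem : d.getD x [] ∈ d := hrow ▸ List.getElem_mem hxd
    have hmemv : (d.getD x [])[y] ∈ d.getD x [] := List.getElem_mem hylen
    have hres := h _ hrmem _ hmemv
    unfold getB
    rw [hv]
    simpa using hres
  · intro h row hrowmem v hvmem
    obtain ⟨x, hx, rfl⟩ := List.mem_iff_getElem.mp hrowmem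
    obtain ⟨y, hy, rfl⟩ := List.mem_iff_getElem.mp hvmem
    have hx' : x < N := by omega
    have hgd : d.getD x [] = d[x] := List.getD_eq_getElem _ _ hx
    have hy' : y < M := by
      have := hr x hx'
      rw [hgd] at this
      omega
    have hz := h x y hx' hy'
    unfold getB at hz
    rw [hgd, List.getD_eq_getElem _ _ hy] at hz
    simp [hz]

theorem final_iff (a b : List (List String)) (N M : Nat) (dF : List (List Bool))
    (hs : ShapeB dF N M)
    (hR : ∀ x, x < N → rPar dF M x % 2 = rowP a b M x % 2)
    (hC : ∀ y, y < M → cPar dF N y % 2 = colP a b N y % 2)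
    (hInt : ∀ x y, x < N - 1 → y < M - 1 → getB dF x y = false) :
    (∀ x y, x < N → y < M → getB dF x y = false)
      ↔ ((∀ x, x < N → rowP a b M x % 2 = 0) ∧ (∀ y, y < M → colP a b N y % 2 = 0)) := by
  obtain ⟨hl, hr⟩ := hs
  have hoobY : ∀ x y, M ≤ y → getB dF x y = false := by
    intro x y hy
    unfold getB
    by_cases hx : x < N
    · have := hr x hx
      exact List.getD_eq_default _ _ (by omega)
    · have : dF.getD x [] = [] := List.getD_eq_default _ _ (by omega)
      rw [this]
      rfl
  have hoobX : ∀ x y, N ≤ x → getB dF x y = false := by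
    intro x y hx
    unfold getB
    have : dF.getD x [] = [] := List.getD_eq_default _ _ (by omega)
    rw [this]
    rfl
  constructor
  · intro h
    constructor
    · intro x hx
      rw [← hR x hx]
      have hz : (List.range M).countP (fun y => getB dF x y) = 0 := by
        rw [List.countP_eq_zero]
        intro t ht
        simp [h x t hx (List.mem_range.mp ht)]
      unfold rPar
      rw [hz]
    · intro y hy
      rw [← hC y hy]
      have hz : (List.range N).countP (fun x => getB dF x y) = 0 := by
        rw [List.countP_eq_zero]
        intro t ht
        simp [h t y (List.mem_range.mp ht) hy]
      unfold cPar
      rw [hz]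
  · rintro ⟨hrow, hcol⟩
    have hLC : ∀ x, x < N - 1 → getB dF x (M-1) = false := by
      intro x hx
      by_cases hM : 1 ≤ M
      · have h2 := hrow x (by omega)
        rw [← hR x (by omega)] at h2
        unfold rPar at h2
        rw [countP_last M hM _ (fun t ht => hInt x t hx ht)] at h2
        by_cases hg : getB dF x (M-1) = true
        · rw [if_pos hg] at h2
          simp at h2
        · simpa using hg
      · exact hoobY x (M-1) (by omega)
    have hLR : ∀ y, y < M - 1 → getB dF (N-1) y = false := by
      intro y hy
      by_cases hN : 1 ≤ N
      · have h2 := hcol y (by omega)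
        rw [← hC y (by omega)] at h2
        unfold cPar at h2
        rw [countP_last N hN _ (fun t ht => hInt t y ht hy)] at h2
        by_cases hg : getB dF (N-1) y = true
        · rw [if_pos hg] at h2
          simp at h2
        · simpa using hg
      · exact hoobX (N-1) y (by omega)
    have hCorner : 1 ≤ N → 1 ≤ M → getB dF (N-1) (M-1) = false := by
      intro hN hM
      have h2 := hrow (N-1) (by omega)
      rw [← hR (N-1) (by omega)] at h2
      unfold rPar at h2
      rw [countP_last M hM _ (fun t ht => hLR t ht)] at h2
      by_cases hg : getB dF (N-1) (M-1) = true
      · rw [if_pos hg] at h2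
        simp at h2
      · simpa using hg
    intro x y hx hy
    by_cases h1 : x < N - 1 <;> by_cases h2 : y < M - 1
    · exact hInt x y h1 h2
    · have he : y = M - 1 := by omega
      subst he
      exact hLC x h1
    · have he : x = N - 1 := by omega
      subst he
      exact hLR y h2
    · have he1 : x = N - 1 := by omega
      have he2 : y = M - 1 := by omega
      subst he1
      subst he2
      exact hCorner (by omega) (by omega)

theorem B_char (n m : Int) (a b : List (List String)) :
    solve_alt n m a b = if AOK a b n.toNat m.toNat then "Yes" else "No" := by
  have hd0 : ((PySem.List.pyRange 0 n 1).map (fun i =>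
      (PySem.List.pyRange 0 m 1).map (fun j =>
        ((PySem.List.pyGetD (PySem.List.pyGetD a i []) j "" == "1")
          != (PySem.List.pyGetD (PySem.List.pyGetD b i []) j "" == "1")))))
      = (List.range n.toNat).map (fun x => (List.range m.toNat).map (fun y => D0 a b x y)) := by
    rw [PySem.List.pyRange_zero n, List.map_map]
    apply List.map_congr_left
    intro x _
    simp only [Function.comp_apply]
    rw [PySem.List.pyRange_zero m, List.map_map]
    apply List.map_congr_left
    intro y _
    simp only [Function.comp_apply, PySem.List.pyGetD_natCast]
    rfl
  have hs0 : ShapeB ((List.range n.toNat).map (fun x => (List.range m.toNat).map (fun y => D0 a b x y))) n.toNat m.toNat := by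
    refine ⟨by simp, ?_⟩
    intro x hx
    rw [PySem.List.getD_map_range _ _ _ _ hx]
    simp
  have hget0 : ∀ x y, x < n.toNat → y < m.toNat →
      getB ((List.range n.toNat).map (fun x => (List.range m.toNat).map (fun y => D0 a b x y))) x y = D0 a b x y := by
    intro x y hx hy
    unfold getB
    rw [PySem.List.getD_map_range _ _ _ _ hx, PySem.List.getD_map_range _ _ _ _ hy]
  have hr0 : ∀ x, x < n.toNat →
      rPar ((List.range n.toNat).map (fun x => (List.range m.toNat).map (fun y => D0 a b x y))) m.toNat x = rowP a b m.toNat x := by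
    intro x hx
    unfold rPar rowP
    apply List.countP_congr
    intro t ht
    rw [hget0 x t hx (List.mem_range.mp ht)]
  have hc0 : ∀ y, y < m.toNat →
      cPar ((List.range n.toNat).map (fun x => (List.range m.toNat).map (fun y => D0 a b x y))) n.toNat y = colP a b n.toNat y := by
    intro y hy
    unfold cPar colP
    apply List.countP_congr
    intro t ht
    rw [hget0 t y (List.mem_range.mp ht) hy]
  have hfold : ∀ (d0 : List (List Bool)),
      ((PySem.List.pyRange 0 (n-1) 1).foldl (fun d i =>
        (PySem.List.pyRange 0 (m-1) 1).foldl (fun d j => elimStep n m d i j) d) d0)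
      = (List.range (n.toNat - 1)).foldl (fun d x =>
          (List.range (m.toNat - 1)).foldl (fun d y => stepN n.toNat m.toNat d x y) d) d0 := by
    intro d0
    rw [PySem.List.pyRange_zero (n-1), List.foldl_map]
    have hNN : (n-1).toNat = n.toNat - 1 := by omega
    rw [hNN]
    apply PySem.List.foldl_congr_mem
    intro acc x hxmem
    have hxlt : x < n.toNat - 1 := List.mem_range.mp hxmem
    have hn : 0 < n := by omega
    rw [PySem.List.pyRange_zero (m-1), List.foldl_map]
    have hMM : (m-1).toNat = m.toNat - 1 := by omega
    rw [hMM]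
    apply PySem.List.foldl_congr_mem
    intro acc2 y hymem
    have hylt : y < m.toNat - 1 := List.mem_range.mp hymem
    have hm : 0 < m := by omega
    exact elimStep_cast n m hn hm acc2 x y
  obtain ⟨hsF, hRF, hCF, hIF⟩ := outerFold n.toNat m.toNat
    ((List.range n.toNat).map (fun x => (List.range m.toNat).map (fun y => D0 a b x y)))
    hs0 (n.toNat - 1) le_rfl
  have hAOK : AOK a b n.toNat m.toNat = true
      ↔ ((∀ x, x < n.toNat → rowP a b m.toNat x % 2 = 0) ∧ (∀ y, y < m.toNat → colP a b n.toNat y % 2 = 0)) := by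
    unfold AOK
    simp [List.all_eq_true, List.mem_range]
  have hfin := final_iff a b n.toNat m.toNat _ hsF
    (fun x hx => (hRF x).trans (by rw [hr0 x hx]))
    (fun y hy => (hCF y).trans (by rw [hc0 y hy]))
    (fun x y hx hy => hIF x y hx hy)
  have hiff := all_false_iff _ n.toNat m.toNat hsF
  simp only [solve_alt]
  rw [hd0, hfold]
  by_cases hA : AOK a b n.toNat m.toNat = true
  · rw [if_pos (hiff.mpr (hfin.mpr (hAOK.mp hA))), if_pos hA]
  · have hnot : ¬ ((((List.range (n.toNat - 1)).foldl (fun d x =>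
        (List.range (m.toNat - 1)).foldl (fun d y => stepN n.toNat m.toNat d x y) d)
        ((List.range n.toNat).map (fun x => (List.range m.toNat).map (fun y => D0 a b x y)))).all
          fun row => row.all fun v => !v) = true) :=
      fun hall => hA (hAOK.mpr (hfin.mp (hiff.mp hall)))
    rw [if_neg hnot, if_neg hA]

-- ===== VERDICT (by name: the statement is the Claim_ definition above) =====
theorem solve_spec : Claim_equal_solve := by
  intro n m a b _ _
  unfold Spec_solve
  rw [A_char, B_char]
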